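-- pv_equiv track=rewrite | github.com/databricks/databricks-sql-python | src/databricks/sql/backend/sea/metadata_constants.py | normalize_metadata_description
-- ===== SOURCE A (Python) =====
-- from typing import List, Tuple, Dict, Any
--
-- def normalize_metadata_description(
--     original_description: List[Tuple], column_definitions: List[Tuple[str, str]]
-- ) -> List[Tuple]:
--     """
--     Transform result set description to use JDBC-standard column names.
--
--     Args:
--         original_description: Original PEP-249 description from SEA backend
--                             Format: [(name, type_code, display_size, internal_size,
--                                      precision, scale, null_ok), ...]
--         column_definitions: List of (jdbc_name, sea_source_name) tuples defining mappings
--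
--     Returns:
--         Normalized description with JDBC column names
--     """
--     if not original_description:
--         return original_description
--
--     # Build mapping from SEA column names to their indices
--     sea_col_to_idx = {}
--     for idx, col_desc in enumerate(original_description):
--         sea_col_to_idx[col_desc[0]] = idx
--
--     # Build new description based on column definitions
--     normalized_description = []
--
--     for jdbc_name, sea_name in column_definitions:
--         if sea_name and sea_name in sea_col_to_idx:
--             # Column exists in original description
--             orig_idx = sea_col_to_idx[sea_name]
--             orig_desc = original_description[orig_idx]
--             # Replace the column name, keep other metadata
--             new_desc = (jdbc_name,) + orig_desc[1:]
--             normalized_description.append(new_desc)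
--         else:
--             # Column doesn't exist, add with default metadata
--             # Use VARCHAR type and nullable=None as defaults
--             normalized_description.append(
--                 (jdbc_name, "string", None, None, None, None, None)
--             )
--
--     return normalized_description
-- ===== SOURCE B (Python) =====
-- def normalize_metadata_description(original_description, column_definitions):
--     if not original_description:
--         return original_description
--     # Inverted traversal: emit a fully-default output first, record which output
--     # slots want which SEA column name, then patch the output in ONE pass over
--     # original_description; later rows overwrite earlier ones (last wins).
--     out = [(jdbc, "string", None, None, None, None, None)
--            for jdbc, _ in column_definitions]
--     need = {}  # sea_name -> list of (output index, jdbc_name) wanting it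
--     for i, (jdbc_name, sea_name) in enumerate(column_definitions):
--         if sea_name:
--             need.setdefault(sea_name, []).append((i, jdbc_name))
--     for row in original_description:
--         for i, jdbc_name in need.get(row[0], []):
--             out[i] = (jdbc_name,) + row[1:]
--     return out
-- ===== Notes on version B (the rewrite author's own statement) =====
-- stated objective: alternative
-- what changed: Inverts the traversal: instead of A's name-to-index dict plus a lookup per column definition, B first emits a fully-default output (recording which output slots want which SEA name), then makes one pass over original_description patching every slot in place, so later rows naturally overwrite earlier ones; Pre_ excludes descriptions containing an empty row, on which both A and B raise IndexError.
import Mathlib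
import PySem

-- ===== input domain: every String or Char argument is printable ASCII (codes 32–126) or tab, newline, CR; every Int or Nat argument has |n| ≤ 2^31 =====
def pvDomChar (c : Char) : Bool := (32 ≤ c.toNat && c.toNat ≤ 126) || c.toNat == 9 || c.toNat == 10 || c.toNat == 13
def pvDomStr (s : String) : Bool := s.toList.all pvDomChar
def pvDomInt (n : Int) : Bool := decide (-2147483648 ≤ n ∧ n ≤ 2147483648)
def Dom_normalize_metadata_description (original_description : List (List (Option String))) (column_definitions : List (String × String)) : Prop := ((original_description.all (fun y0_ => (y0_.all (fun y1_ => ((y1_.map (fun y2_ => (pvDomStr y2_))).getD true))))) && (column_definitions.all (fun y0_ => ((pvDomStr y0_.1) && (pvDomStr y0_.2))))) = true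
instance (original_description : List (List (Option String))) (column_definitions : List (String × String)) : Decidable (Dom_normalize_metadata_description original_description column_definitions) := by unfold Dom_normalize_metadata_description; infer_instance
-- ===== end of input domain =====

-- B inverts the traversal: it emits a fully-default output, records which output slots want which
-- SEA name, and patches the output in one pass over the description; return values only.

-- ===== PORT A =====
-- A-side helper: the sea_col_to_idx dict A builds (last occurrence of a name wins).
-- Python indexes col_desc[0], which raises IndexError on an empty row; Pre_ excludes empty rows,
-- so 'headD none' (= col_desc[0] on nonempty rows) is exact on the admitted domain.
def pvSeaColToIdx (original_description : List (List (Option String))) : PySem.Dict (Option String) Int :=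
  (PySem.List.enumerate original_description).foldl
    (fun d p => d.insert (p.2.headD none) p.1) PySem.Dict.empty

def normalize_metadata_description (original_description : List (List (Option String))) (column_definitions : List (String × String)) : List (List (Option String)) :=
  if original_description = [] then original_description
  else
    let sea_col_to_idx := pvSeaColToIdx original_description
    column_definitions.foldl (fun normalized p =>
      -- 'if sea_name and sea_name in sea_col_to_idx' then look up, else default row
      match (if p.2 = "" then none else sea_col_to_idx.get? (some p.2)) with
      | some orig_idx =>
          let orig_desc := PySem.List.pyGetD original_description orig_idx []
          normalized ++ [some p.1 :: PySem.List.slice orig_desc (some 1)]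
      | none =>
          normalized ++ [[some p.1, some "string", none, none, none, none, none]]) []

-- ===== PORT B =====
-- B-side helper: the 'need' dict (sea_name -> list of (output index, jdbc_name) wanting it);
-- Python's enumerate indices are the list positions, kept as Nat.
def pvNeed (column_definitions : List (String × String)) : PySem.Dict (Option String) (List (Nat × String)) :=
  column_definitions.zipIdx.foldl (fun d e =>
    if e.1.2 = "" then d
    else d.insert (some e.1.2) (d.getD (some e.1.2) [] ++ [(e.2, e.1.1)])) PySem.Dict.empty

def normalize_metadata_description_alt (original_description : List (List (Option String))) (column_definitions : List (String × String)) : List (List (Option String)) :=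
  if original_description = [] then original_description
  else
    let need := pvNeed column_definitions
    -- the fully-default output
    let out0 := column_definitions.map (fun p => [some p.1, some "string", none, none, none, none, none])
    -- one pass over the description, patching every slot that wants each row
    -- (row[0] raises on an empty row in Python, excluded by Pre_; headD none is exact otherwise)
    original_description.foldl (fun out row =>
      (need.getD (row.headD none) []).foldl
        (fun o e => o.set e.1 (some e.2 :: PySem.List.slice row (some 1))) out) out0

-- ===== PRECONDITION & SPEC =====
-- Pre_ excludes descriptions containing an empty row: there Python A (and B) raises IndexError (col_desc[0]/row[0]).
def Pre_normalize_metadata_description (original_description : List (List (Option String))) (column_definitions : List (String × String)) : Prop :=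
  ∀ r ∈ original_description, r ≠ []
instance (original_description : List (List (Option String))) (column_definitions : List (String × String)) : Decidable (Pre_normalize_metadata_description original_description column_definitions) := by unfold Pre_normalize_metadata_description; infer_instance

def pvWitness_normalize_metadata_description : List (List (Option String)) × (List (String × String)) :=
  ([[some "a", some "int"]], [("J", "a"), ("K", "")])

def Spec_normalize_metadata_description (original_description : List (List (Option String))) (column_definitions : List (String × String)) (out : List (List (Option String))) : Prop := out = normalize_metadata_description_alt original_description column_definitions
instance (original_description : List (List (Option String))) (column_definitions : List (String × String)) (out : List (List (Option String))) : Decidable (Spec_normalize_metadata_description original_description column_definitions out) := by unfold Spec_normalize_metadata_description; infer_instance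

-- ===== CLAIM (what is proved, stated in full; the proofs are below) =====
def Claim_equal_normalize_metadata_description : Prop := ∀ (original_description : List (List (Option String))) (column_definitions : List (String × String)), Dom_normalize_metadata_description original_description column_definitions → Pre_normalize_metadata_description original_description column_definitions → Spec_normalize_metadata_description original_description column_definitions (normalize_metadata_description original_description column_definitions)

-- ===== LEMMAS AND PROOFS =====

-- The common specification both ports are reduced to: per column definition, the last matching row.
def pvMatchRow (od : List (List (Option String))) (p : String × String) : List (Option String) :=
  match (if p.2 = "" then none else od.reverse.find? (fun r => r.head? == some (some p.2))) with
  | some row => some p.1 :: PySem.List.slice row (some 1)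
  | none => [some p.1, some "string", none, none, none, none, none]

-- ---- A side ----

-- The dict lookup, dereferenced through the original description, is exactly the backwards scan,
-- and every stored index is in range.
theorem pvLookup_spec (od : List (List (Option String))) (s : String) :
    ((match (pvSeaColToIdx od).get? (some s) with
      | some i => some (PySem.List.pyGetD od i [])
      | none => (none : Option (List (Option String))))
      = od.reverse.find? (fun r => r.head? == some (some s)))
    ∧ (∀ i, (pvSeaColToIdx od).get? (some s) = some i → 0 ≤ i ∧ i < (od.length : Int)) := by
  induction od using List.reverseRecOn with
  | nil =>
      refine ⟨?_, ?_⟩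
      · simp [pvSeaColToIdx, PySem.List.enumerate_nil, PySem.Dict.get?_empty]
      · intro i h
        simp [pvSeaColToIdx, PySem.List.enumerate_nil, PySem.Dict.get?_empty] at h
  | append_singleton xs r ih =>
      have hdict : pvSeaColToIdx (xs ++ [r])
          = (pvSeaColToIdx xs).insert (r.headD none) (xs.length : Int) := by
        simp [pvSeaColToIdx, PySem.List.enumerate_append, PySem.List.enumerate_cons,
          PySem.List.enumerate_nil, List.foldl_append]
      by_cases hk : (some s : Option String) = r.headD none
      · -- r's first element is s: insert wins, index points at r
        have hhead : r.head? = some (some s) := by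
          cases r with
          | nil => simp at hk
          | cons a t => simpa using hk.symm
        have hget : (pvSeaColToIdx (xs ++ [r])).get? (some s) = some (xs.length : Int) := by
          rw [hdict, ← hk]
          exact PySem.Dict.get?_insert_self _ _ _
        refine ⟨?_, ?_⟩
        · rw [hget]
          show some (PySem.List.pyGetD (xs ++ [r]) (xs.length : Int) []) = _
          have hlen : ((xs.length : Int)) < ((xs ++ [r]).length : Int) := by
            simp
          rw [PySem.List.pyGetD_eq_getElem _ _ (by positivity) hlen]
          have : (xs ++ [r])[(xs.length : Int).toNat] = r := by
            simp
          rw [this]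
          simp [List.reverse_append, hhead]
        · intro i hi
          rw [hget] at hi
          cases hi
          constructor <;> [positivity; simp]
      · -- different key: fall through to the prefix
        have hget : (pvSeaColToIdx (xs ++ [r])).get? (some s) = (pvSeaColToIdx xs).get? (some s) := by
          rw [hdict]
          exact PySem.Dict.get?_insert_of_ne _ _ hk
        have hhead : (r.head? == some (some s)) = false := by
          cases r with
          | nil => simp
          | cons a t =>
              have hne : a ≠ some s := fun h => hk (by simp [h])
              simp only [List.head?_cons, beq_eq_false_iff_ne, ne_eq, Option.some.injEq]
              exact hne
        refine ⟨?_, ?_⟩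
        · rw [hget]
          rw [List.reverse_append]
          simp only [List.reverse_singleton, List.singleton_append, List.find?, hhead]
          rw [← ih.1]
          cases hidx : (pvSeaColToIdx xs).get? (some s) with
          | none => simp
          | some i =>
              have hb := ih.2 i hidx
              simp only
              congr 1
              rw [PySem.List.pyGetD_eq_getElem _ _ hb.1 (by simp; omega),
                  PySem.List.pyGetD_eq_getElem _ _ hb.1 hb.2]
              rw [List.getElem_append_left]
        · intro i hi
          rw [hget] at hi
          have hb := ih.2 i hi
          constructor
          · exact hb.1
          · have := hb.2; simp; omega

-- A's foldl-append loop over the column definitions is the map of its per-column body.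
theorem pvFoldA (od : List (List (Option String)))
    (cds : List (String × String)) (acc : List (List (Option String))) :
    cds.foldl (fun normalized p =>
      match (if p.2 = "" then none else (pvSeaColToIdx od).get? (some p.2)) with
      | some orig_idx =>
          normalized ++ [some p.1 :: PySem.List.slice (PySem.List.pyGetD od orig_idx []) (some 1)]
      | none => normalized ++ [[some p.1, some "string", none, none, none, none, none]]) acc
    = acc ++ cds.map (fun p =>
      match (if p.2 = "" then none else (pvSeaColToIdx od).get? (some p.2)) with
      | some orig_idx => some p.1 :: PySem.List.slice (PySem.List.pyGetD od orig_idx []) (some 1)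
      | none => [some p.1, some "string", none, none, none, none, none]) := by
  induction cds generalizing acc with
  | nil => simp
  | cons c t ih =>
      simp only [List.foldl_cons, List.map_cons]
      cases (if c.2 = "" then none else (pvSeaColToIdx od).get? (some c.2)) with
      | none => rw [ih]; simp
      | some i => rw [ih]; simp

theorem pvA_eq_map (od : List (List (Option String))) (cds : List (String × String)) (hod : od ≠ []) :
    normalize_metadata_description od cds = cds.map (pvMatchRow od) := by
  unfold normalize_metadata_description
  simp only [hod, if_false]
  rw [pvFoldA]
  simp only [List.nil_append]
  apply List.map_congr_left
  intro p _
  unfold pvMatchRow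
  by_cases hs : p.2 = ""
  · simp [hs]
  · simp only [hs, if_false]
    have h := (pvLookup_spec od p.2).1
    cases hidx : (pvSeaColToIdx od).get? (some p.2) with
    | none =>
        rw [hidx] at h
        simp only at h
        rw [← h]
    | some i =>
        rw [hidx] at h
        simp only at h
        rw [← h]

-- ---- B side ----

-- What pvNeed stores under key (some s): the indexed column definitions whose SEA name is s.
def pvN (cds : List (String × String)) (s : String) : List (Nat × String) :=
  cds.zipIdx.filterMap (fun e => if s ≠ "" ∧ e.1.2 = s then some (e.2, e.1.1) else none)

theorem pvNeed_getD (cds : List (String × String)) (k : Option String) :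
    (pvNeed cds).getD k [] = match k with | none => [] | some s => pvN cds s := by
  induction cds using List.reverseRecOn with
  | nil =>
      cases k <;> simp [pvNeed, pvN, PySem.Dict.getD, PySem.Dict.get?_empty]
  | append_singleton xs c ih =>
      have hz : (xs ++ [c]).zipIdx = xs.zipIdx ++ [(c, xs.length)] := by
        simp [List.zipIdx_append]
      by_cases hc : c.2 = ""
      · have hneed : pvNeed (xs ++ [c]) = pvNeed xs := by
          simp [pvNeed, hz, List.foldl_append, hc]
        rw [hneed, ih]
        cases k with
        | none => rfl
        | some s =>
            have hcond : ¬ (s ≠ "" ∧ c.2 = s) := by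
              rintro ⟨h1, h2⟩
              exact h1 (by rw [← h2, hc])
            simp only [pvN, hz, List.filterMap_append]
            simp [hcond]
      · have hneed : pvNeed (xs ++ [c])
            = (pvNeed xs).insert (some c.2) ((pvNeed xs).getD (some c.2) [] ++ [(xs.length, c.1)]) := by
          simp [pvNeed, hz, List.foldl_append, hc]
        rw [hneed]
        cases k with
        | none =>
            rw [PySem.Dict.getD_insert_of_ne _ _ _ (by simp)]
            exact ih
        | some s =>
            by_cases hs : s = c.2
            · subst hs
              rw [PySem.Dict.getD_insert_self, ih]
              simp only [pvN, hz, List.filterMap_append]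
              simp [hc]
            · rw [PySem.Dict.getD_insert_of_ne _ _ _ (by simp [hs]), ih]
              have hcond : ¬ (s ≠ "" ∧ c.2 = s) := fun h => hs h.2.symm
              simp only [pvN, hz, List.filterMap_append]
              simp [hcond]

theorem pvN_mem (cds : List (String × String)) (s : String) (i : Nat) (j : String) :
    (i, j) ∈ pvN cds s ↔ s ≠ "" ∧ cds[i]? = some (j, s) := by
  unfold pvN
  rw [List.mem_filterMap]
  constructor
  · rintro ⟨⟨⟨j', s'⟩, i'⟩, he, hfe⟩
    split_ifs at hfe with hcond
    · cases hfe
      obtain ⟨hs, hs'⟩ := hcond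
      subst hs'
      exact ⟨hs, List.mk_mem_zipIdx_iff_getElem?.mp he⟩
  · rintro ⟨hs, hget⟩
    exact ⟨((j, s), i), List.mk_mem_zipIdx_iff_getElem?.mpr hget, by simp [hs]⟩

-- The inner set-fold: the last listed occurrence of an index wins; other indices are untouched.
theorem pvFoldSet_length (row : List (Option String)) (l : List (Nat × String))
    (out : List (List (Option String))) :
    (l.foldl (fun o e => o.set e.1 (some e.2 :: PySem.List.slice row (some 1))) out).length
      = out.length := by
  induction l generalizing out with
  | nil => rfl
  | cons e t ih => simp [ih]

theorem pvFoldSet_getElem? (row : List (Option String)) (l : List (Nat × String))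
    (out : List (List (Option String))) (k : Nat) :
    (l.foldl (fun o e => o.set e.1 (some e.2 :: PySem.List.slice row (some 1))) out)[k]? =
      match l.reverse.find? (fun e => e.1 == k) with
      | some e => if k < out.length then some (some e.2 :: PySem.List.slice row (some 1)) else none
      | none => out[k]? := by
  induction l generalizing out with
  | nil => rfl
  | cons e t ih =>
      simp only [List.foldl_cons, List.reverse_cons, List.find?_append]
      rw [ih]
      cases hf : t.reverse.find? (fun e => e.1 == k) with
      | some e' =>
          simp [List.length_set]
      | none =>
          by_cases hek : e.1 = k
          · subst hek
            simp [List.getElem?_set]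
          · have hb : (e.1 == k) = false := by simpa using hek
            simp [List.find?, hb, List.getElem?_set_ne hek]

-- Rows whose first element is not (some s) never match pvMatchRow's scan.
theorem pvHead_no_match (r : List (Option String)) (h : r.headD none = none) (x : String) :
    (r.head? == some (some x)) = false := by
  cases r with
  | nil => simp
  | cons a t => cases a with
    | none => simp
    | some s => simp at h

-- B's patch loop computes pvMatchRow pointwise.
theorem pvB_loop (cds : List (String × String)) (od : List (List (Option String))) :
    ((od.foldl (fun out row =>
        ((pvNeed cds).getD (row.headD none) []).foldl
          (fun o e => o.set e.1 (some e.2 :: PySem.List.slice row (some 1))) out)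
      (cds.map (fun p => [some p.1, some "string", none, none, none, none, none]))).length = cds.length)
    ∧ (∀ k, (k < cds.length) →
      (od.foldl (fun out row =>
        ((pvNeed cds).getD (row.headD none) []).foldl
          (fun o e => o.set e.1 (some e.2 :: PySem.List.slice row (some 1))) out)
        (cds.map (fun p => [some p.1, some "string", none, none, none, none, none])))[k]?
      = (cds.map (pvMatchRow od))[k]?) := by
  induction od using List.reverseRecOn with
  | nil =>
      refine ⟨by simp, ?_⟩
      intro k hk
      simp only [List.foldl_nil, List.getElem?_map]
      congr 1
      funext p
      unfold pvMatchRow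
      by_cases hs : p.2 = "" <;> simp [hs]
  | append_singleton xs r ih =>
      simp only [List.foldl_append, List.foldl_cons, List.foldl_nil]
      refine ⟨?_, ?_⟩
      · rw [pvFoldSet_length]; exact ih.1
      · intro k hk
        rw [pvFoldSet_getElem? _ _ _ k]
        have hlen := ih.1
        have hIH := ih.2 k hk
        cases hhd : r.headD none with
        | none =>
            rw [pvNeed_getD]
            rw [hIH]
            simp only [List.getElem?_map]
            apply Option.map_congr
            intro p hp
            unfold pvMatchRow
            by_cases hs : p.2 = ""
            · simp [hs]
            · simp only [hs, if_false, List.reverse_append, List.reverse_singleton,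
                List.singleton_append, List.find?, pvHead_no_match r hhd p.2]
        | some s =>
            have hhead : r.head? = some (some s) := by
              cases r with
              | nil => simp at hhd
              | cons a t => simpa using hhd
            rw [pvNeed_getD]
            simp only
            cases hf : (pvN cds s).reverse.find? (fun e => e.1 == k) with
            | some e =>
                have hmem : (e.1, e.2) ∈ pvN cds s := by
                  have h1 := List.mem_of_find?_eq_some hf
                  simpa using List.mem_reverse.mp h1
                have hek : e.1 = k := by
                  have := List.find?_some hf
                  simpa using this
                obtain ⟨hs2, hget⟩ := (pvN_mem cds s e.1 e.2).mp hmem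
                rw [hek] at hget
                have hcds : cds[k] = (e.2, s) := by
                  rw [List.getElem?_eq_getElem hk] at hget
                  exact Option.some.inj hget
                simp only [hlen, hk, if_true]
                rw [List.getElem?_map, List.getElem?_eq_getElem hk]
                simp only [Option.map_some, hcds]
                unfold pvMatchRow
                simp only [hs2, if_false, List.reverse_append, List.reverse_singleton,
                  List.singleton_append, List.find?, hhead]
                simp
            | none =>
                have hnone : ∀ e ∈ pvN cds s, ¬ e.1 = k := by
                  intro e he hek
                  have h1 := List.find?_eq_none.mp hf (e.1, e.2) (by simpa using he)
                  simp [hek] at h1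
                rw [hIH]
                simp only [List.getElem?_map, List.getElem?_eq_getElem hk, Option.map_some]
                congr 1
                set p := cds[k] with hp
                unfold pvMatchRow
                by_cases hs : p.2 = ""
                · simp [hs]
                · simp only [hs, if_false, List.reverse_append, List.reverse_singleton,
                    List.singleton_append, List.find?]
                  have hps : ¬ p.2 = s := by
                    intro h
                    have hm : (k, p.1) ∈ pvN cds s := by
                      refine (pvN_mem cds s k p.1).mpr ⟨by rw [← h]; exact hs, ?_⟩
                      rw [List.getElem?_eq_getElem hk, ← hp, ← h]
                    exact hnone (k, p.1) hm rfl
                  have hfalse : (r.head? == some (some p.2)) = false := by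
                    rw [hhead]
                    simp only [beq_eq_false_iff_ne, ne_eq, Option.some.injEq]
                    exact fun h => hps h.symm
                  rw [hfalse]

-- ===== VERDICT (by name: the statement is the Claim_ definition above) =====
theorem normalize_metadata_description_spec : Claim_equal_normalize_metadata_description := by
  intro od cds _ hpre
  unfold Spec_normalize_metadata_description
  by_cases hod : od = []
  · simp [hod, normalize_metadata_description, normalize_metadata_description_alt]
  · rw [pvA_eq_map od cds hod]
    unfold normalize_metadata_description_alt
    simp only [hod, if_false]
    apply List.ext_getElem?
    intro k
    by_cases hk : k < cds.length
    · exact ((pvB_loop cds od).2 k hk).symm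
    · rw [List.getElem?_eq_none (by simpa using not_lt.mp hk)]
      rw [List.getElem?_eq_none]
      rw [(pvB_loop cds od).1]
      exact not_lt.mp hk
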